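-- pv_equiv track=rewrite | github.com/bennuttall/advent-of-code-2018 | d8/d8.py | tree_value
-- ===== SOURCE A (Python) =====
-- def tree_value(data):
--     nc = data.pop(0)
--     nm = data.pop(0)
--     values = [tree_value(data) for i in range(nc)]
--     metadata = [data.pop(0) for i in range(nm)]
--     if nc == 0:
--         return sum(metadata)
--     return sum(values[i-1] for i in metadata if i-1 in range(nc))
-- ===== SOURCE B (Python) =====
-- def tree_value(data):
--     # Two-phase: O(n) index-based parse into an explicit (nc, children, metadata) tree,
--     # then a separate bottom-up evaluation. Does not mutate `data` (A empties it).
--     def parse(i):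
--         nc = data[i]
--         nm = data[i + 1]
--         i += 2
--         children = []
--         for _ in range(nc):
--             child, i = parse(i)
--             children.append(child)
--         k = max(nm, 0)
--         metadata = data[i:i + k]
--         return (nc, children, metadata), i + k
--
--     def value(node):
--         nc, children, metadata = node
--         if nc == 0:
--             return sum(metadata)
--         vals = [value(c) for c in children]
--         return sum(vals[m - 1] for m in metadata if 1 <= m <= nc)
--
--     node, _ = parse(0)
--     return value(node)
-- ===== Notes on version B (the rewrite author's own statement) =====
-- stated objective: faster
-- what changed: A interleaves parsing and evaluation in one recursion that consumes the list with pop(0) (O(n) per pop); B is a two-phase rewrite: an O(n) index-based parse into an explicit (nc, children, metadata) tree, then a separate bottom-up evaluation of that tree.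
import Mathlib
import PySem

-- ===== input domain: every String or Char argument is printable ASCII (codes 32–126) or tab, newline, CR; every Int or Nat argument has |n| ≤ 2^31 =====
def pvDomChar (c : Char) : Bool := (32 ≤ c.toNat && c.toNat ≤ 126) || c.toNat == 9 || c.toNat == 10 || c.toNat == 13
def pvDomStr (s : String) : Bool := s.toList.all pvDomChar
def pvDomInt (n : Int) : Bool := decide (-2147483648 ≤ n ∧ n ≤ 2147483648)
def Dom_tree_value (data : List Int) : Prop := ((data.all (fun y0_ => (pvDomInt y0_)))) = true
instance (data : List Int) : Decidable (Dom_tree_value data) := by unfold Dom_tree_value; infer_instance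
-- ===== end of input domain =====

-- B replaces A's pop(0)-consuming single recursion by a two-phase rewrite: an index-based parse
-- into an explicit (nc, children, metadata) tree, then a separate bottom-up evaluation.
-- Python A mutates `data` in place (pops the parsed prefix off it), B does not; the equivalence
-- proved here is about the return value only.

-- ===== PORT A =====
-- metadata = [data.pop(0) for i in range(nm)]  (n pops; none = IndexError on an exhausted list)
def popN : Nat → List Int → Option (List Int × List Int)
  | 0, data => some ([], data)
  | _+1, [] => none
  | n+1, x :: data =>
    match popN n data with
    | none => none
    | some (ms, rest) => some (x :: ms, rest)

-- children loop '[tree_value(data) for i in range(nc)]', abstracted over the recursive call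
def kidsAF (f : List Int → Option (Int × List Int)) : Nat → List Int → Option (List Int × List Int)
  | 0, data => some ([], data)
  | n+1, data =>
    match f data with
    | none => none
    | some (v, rest) =>
      match kidsAF f n rest with
      | none => none
      | some (vs, rest2) => some (v :: vs, rest2)

-- A's recursion, threading the consumed list; fuel (strictly more than any possible depth)
-- only makes the recursion structural — `none` is exactly where Python A raises IndexError.
def treeA : Nat → List Int → Option (Int × List Int)
  | 0, _ => none
  | fuel+1, data =>
    match data with
    | [] => none                                   -- data.pop(0) raises
    | nc :: data1 =>
      match data1 with
      | [] => none                                 -- data.pop(0) raises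
      | nm :: data2 =>
        match kidsAF (treeA fuel) nc.toNat data2 with
        | none => none
        | some (values, data3) =>
          match popN nm.toNat data3 with
          | none => none
          | some (metadata, data4) =>
            if nc = 0 then some (metadata.sum, data4)
            else some (((metadata.filter (fun i => decide (0 ≤ i - 1) && decide (i - 1 < nc))).map
                         (fun i => values.getD (i - 1).toNat 0)).sum, data4)

def tree_value (data : List Int) : Int :=
  match treeA (data.length + 1) data with
  | some (v, _) => v
  | none => 0                                      -- A raises here; excluded by Pre_

-- ===== PORT B =====
mutual
inductive NodeB : Type where
  | mk : Int → NodeListB → List Int → NodeB       -- (nc, children, metadata)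
  deriving DecidableEq, Repr
inductive NodeListB : Type where
  | nil : NodeListB
  | cons : NodeB → NodeListB → NodeListB
  deriving DecidableEq, Repr
end

-- phase 1: parse(i) — index-based, `data` is never changed; same fuel device as above
def parseKidsF (f : Int → Option (NodeB × Int)) : Nat → Int → Option (NodeListB × Int)
  | 0, i => some (.nil, i)
  | n+1, i =>
    match f i with
    | none => none
    | some (c, j) =>
      match parseKidsF f n j with
      | none => none
      | some (cs, k) => some (.cons c cs, k)

def parseB (data : List Int) : Nat → Int → Option (NodeB × Int)
  | 0, _ => none
  | fuel+1, i =>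
    match PySem.List.pyGet? data i, PySem.List.pyGet? data (i + 1) with  -- data[i], data[i+1]
    | some nc, some nm =>
      match parseKidsF (parseB data fuel) nc.toNat (i + 2) with
      | none => none
      | some (children, j) =>
        some (NodeB.mk nc children (PySem.List.slice data (some j) (some (j + max nm 0))),
          j + max nm 0)                            -- k = max(nm, 0); metadata = data[j:j+k]
    | _, _ => none                                 -- IndexError; excluded by Pre_

-- phase 2: value(node)
mutual
def evalB : NodeB → Int
  | .mk nc children metadata =>
    if nc = 0 then metadata.sum
    else
      let vals := evalList children
      ((metadata.filter (fun m => decide (1 ≤ m) && decide (m ≤ nc))).map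
        (fun m => vals.getD (m - 1).toNat 0)).sum
def evalList : NodeListB → List Int               -- vals = [value(c) for c in children]
  | .nil => []
  | .cons c cs => evalB c :: evalList cs
end

def tree_value_alt (data : List Int) : Int :=
  match parseB data (data.length + 1) 0 with
  | some (node, _) => evalB node
  | none => 0                                      -- B raises here; excluded by Pre_

-- ===== PRECONDITION & SPEC =====
-- shape checker for Pre_ (checks only that the header counts fit the available elements,
-- exactly A's acceptance; computes no values)
def chkKidsF (f : List Int → Option (List Int)) : Nat → List Int → Option (List Int)
  | 0, data => some data
  | n+1, data =>
    match f data with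
    | none => none
    | some rest => chkKidsF f n rest

def chkTree : Nat → List Int → Option (List Int)
  | 0, _ => none
  | fuel+1, data =>
    match data with
    | nc :: nm :: rest =>
      match chkKidsF (chkTree fuel) nc.toNat rest with
      | none => none
      | some rest2 =>
        if nm.toNat ≤ rest2.length then some (rest2.drop nm.toNat) else none
    | _ => none

-- Pre_: exactly the inputs on which Python A returns (a header-count-consistent tree encoding
-- as a prefix; trailing elements allowed) — elsewhere A raises IndexError popping an exhausted
-- list. The tree grammar is recursive, so the check is a structural shape scan of the input.
def Pre_tree_value (data : List Int) : Prop := (chkTree (data.length + 1) data).isSome = true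
instance (data : List Int) : Decidable (Pre_tree_value data) := by unfold Pre_tree_value; infer_instance

def pvWitness_tree_value : List Int := [2, 3, 0, 3, 10, 11, 12, 1, 1, 0, 1, 99, 2, 1, 1, 2]

def Spec_tree_value (data : List Int) (out : Int) : Prop := out = tree_value_alt data
instance (data : List Int) (out : Int) : Decidable (Spec_tree_value data out) := by unfold Spec_tree_value; infer_instance

-- ===== CLAIM (what is proved, stated in full; the proofs are below) =====
def Claim_equal_tree_value : Prop := ∀ (data : List Int), Dom_tree_value data → Pre_tree_value data → Spec_tree_value data (tree_value data)

-- ===== LEMMAS AND PROOFS =====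

-- proof-side named wrappers for the fueled loops
def kidsA (fuel : Nat) : Nat → List Int → Option (List Int × List Int) := kidsAF (treeA fuel)
def parseKids (data : List Int) (fuel : Nat) : Nat → Int → Option (NodeListB × Int) :=
  parseKidsF (parseB data fuel)
def chkKids (fuel : Nat) : Nat → List Int → Option (List Int) := chkKidsF (chkTree fuel)

theorem chkKids_def (fuel : Nat) : chkKidsF (chkTree fuel) = chkKids fuel := rfl
theorem kidsA_def (fuel : Nat) : kidsAF (treeA fuel) = kidsA fuel := rfl
theorem parseKids_def (data : List Int) (fuel : Nat) :
    parseKidsF (parseB data fuel) = parseKids data fuel := rfl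

theorem popN_spec : ∀ (n : Nat) (xs : List Int), n ≤ xs.length →
    popN n xs = some (xs.take n, xs.drop n) := by
  intro n
  induction n with
  | zero => intro xs _; simp [popN]
  | succ n ih =>
    intro xs h
    cases xs with
    | nil => simp at h
    | cons x xs => simp [popN, ih xs (by simpa using h)]

-- the statements proved by mutual fuel induction
def TreeStmt (fuel : Nat) : Prop :=
  ∀ (data : List Int) (i : Nat) (r : List Int),
    chkTree fuel (data.drop i) = some r →
    ∃ (t : NodeB) (j : Nat), data.drop j = r ∧
      parseB data fuel (i : Int) = some (t, (j : Int)) ∧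
      treeA fuel (data.drop i) = some (evalB t, r)

def KidsStmt (fuel : Nat) : Prop :=
  ∀ (n : Nat) (data : List Int) (i : Nat) (r : List Int),
    chkKids fuel n (data.drop i) = some r →
    ∃ (ts : NodeListB) (j : Nat), data.drop j = r ∧
      parseKids data fuel n (i : Int) = some (ts, (j : Int)) ∧
      kidsA fuel n (data.drop i) = some (evalList ts, r)

theorem kids_of_tree (fuel : Nat) (ht : TreeStmt fuel) : KidsStmt fuel := by
  intro n
  induction n with
  | zero =>
    intro data i r h
    simp only [← chkKids_def, chkKidsF, Option.some.injEq] at h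
    exact ⟨.nil, i, h, by simp [← parseKids_def, parseKidsF],
      by simp [← kidsA_def, kidsAF, h, evalList]⟩
  | succ n ih =>
    intro data i r h
    rw [← chkKids_def, chkKidsF, chkKids_def] at h
    cases hct : chkTree fuel (data.drop i) with
    | none => rw [hct] at h; simp at h
    | some rest =>
      rw [hct] at h
      simp only at h
      obtain ⟨t, j, hdropj, hpb, hta⟩ := ht data i rest hct
      obtain ⟨ts, k, hdropk, hpk, hka⟩ := ih data j r (by rw [hdropj]; exact h)
      refine ⟨.cons t ts, k, hdropk, ?_, ?_⟩
      · rw [← parseKids_def, parseKidsF, hpb]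
        simp only [parseKids_def, hpk]
      · rw [← kidsA_def, kidsAF, hta]
        simp only [kidsA_def, ← hdropj, hka, evalList]

theorem tree_all : ∀ fuel, TreeStmt fuel := by
  intro fuel
  induction fuel with
  | zero => intro data i r h; simp [chkTree] at h
  | succ fuel ih =>
    have hk := kids_of_tree fuel ih
    intro data i r h
    cases hd : data.drop i with
    | nil => rw [hd] at h; simp [chkTree] at h
    | cons nc d1 =>
      cases d1 with
      | nil => rw [hd] at h; simp [chkTree] at h
      | cons nm rest =>
        rw [hd, chkTree, chkKids_def] at h
        cases hck : chkKids fuel nc.toNat rest with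
        | none => rw [hck] at h; simp at h
        | some rest2 =>
          rw [hck] at h
          simp only at h
          by_cases hlen : nm.toNat ≤ rest2.length
          swap
          · rw [if_neg hlen] at h; simp at h
          rw [if_pos hlen] at h
          simp only [Option.some.injEq] at h
          subst h
          -- rest is the suffix of data at index i + 2
          have hrest : data.drop (i + 2) = rest := by
            have h2 := congrArg (List.drop 2) hd
            rw [List.drop_drop] at h2
            simpa [Nat.add_comm] using h2
          obtain ⟨ts, j, hdropj, hpk, hka⟩ :=
            hk nc.toNat data (i + 2) rest2 (by rw [hrest]; exact hck)
          -- the two data reads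
          have h0 : data[i]? = some nc := by
            rw [← List.head?_drop, hd]; rfl
          have h1 : data[i + 1]? = some nm := by
            rw [← List.head?_drop]
            have h2 := congrArg (List.drop 1) hd
            rw [List.drop_drop] at h2
            rw [h2]; rfl
          have hmax : max nm 0 = ((nm.toNat : Nat) : Int) := (Int.ofNat_toNat nm).symm
          refine ⟨NodeB.mk nc ts (rest2.take nm.toNat), j + nm.toNat, ?_, ?_, ?_⟩
          · rw [← List.drop_drop, hdropj]
          · rw [parseB, parseKids_def]
            have e1 : PySem.List.pyGet? data (i : Int) = some nc := by
              rw [PySem.List.pyGet?_natCast]; exact h0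
            have e2 : PySem.List.pyGet? data ((i : Int) + 1) = some nm := by
              rw [show ((i : Int) + 1) = ((i + 1 : Nat) : Int) by push_cast; ring,
                PySem.List.pyGet?_natCast]
              exact h1
            simp only [e1, e2]
            rw [show ((i : Int) + 2) = ((i + 2 : Nat) : Int) by push_cast; ring]
            simp only [hpk, hmax, PySem.List.slice_natCast_add, hdropj, Option.some.injEq,
              Prod.mk.injEq]
            trivial
          · rw [treeA, kidsA_def]
            rw [hrest] at hka
            simp only [hka, popN_spec nm.toNat rest2 hlen]
            by_cases hz : nc = 0
            · rw [if_pos hz, evalB, if_pos hz]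
            · rw [if_neg hz, evalB, if_neg hz]
              have hfun : (fun m : Int => decide (0 ≤ m - 1) && decide (m - 1 < nc)) =
                  (fun m : Int => decide (1 ≤ m) && decide (m ≤ nc)) := by
                funext m
                congr 1
                · exact decide_eq_decide.mpr (by omega)
                · exact decide_eq_decide.mpr (by omega)
              simp only [hfun]

-- ===== VERDICT (by name: the statement is the Claim_ definition above) =====
theorem tree_value_spec : Claim_equal_tree_value := by
  intro data _ hpre
  unfold Pre_tree_value at hpre
  rw [Option.isSome_iff_exists] at hpre
  obtain ⟨r, hr⟩ := hpre
  obtain ⟨t, j, _, hpb, hta⟩ :=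
    tree_all (data.length + 1) data 0 r (by simpa using hr)
  rw [List.drop_zero] at hta
  unfold Spec_tree_value tree_value tree_value_alt
  rw [hta]
  rw [show ((0 : Nat) : Int) = (0 : Int) by norm_num] at hpb
  rw [hpb]
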